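-- pv_equiv track=rewrite | github.com/acharya-aayush/6th_sem_Labs | Compiler/aayush04lab5.py | dfa_even_0_1
-- ===== SOURCE A (Python) =====
-- def dfa_even_0_1(s):
--     state = 'q0'
--     for c in s:
--         if state=='q0':
--             state = 'q2' if c=='0' else 'q1'
--         elif state=='q1':
--             state = 'q3' if c=='0' else 'q0'
--         elif state=='q2':
--             state = 'q0' if c=='0' else 'q3'
--         elif state=='q3':
--             state = 'q1' if c=='0' else 'q2'
--     return state=='q0'
-- ===== SOURCE B (Python) =====
-- def dfa_even_0_1(s):
--     zeros = s.count('0')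
--     return zeros % 2 == 0 and (len(s) - zeros) % 2 == 0
-- ===== Notes on version B (the rewrite author's own statement) =====
-- stated objective: simpler
-- what changed: Replaces the explicit 4-state string-labelled FSM loop with a count-based closed form: count the zero characters once, then accept iff that count and the count of the remaining characters are both even (any non-zero character counts toward the second parity, exactly as A's else-branch).
import Mathlib
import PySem

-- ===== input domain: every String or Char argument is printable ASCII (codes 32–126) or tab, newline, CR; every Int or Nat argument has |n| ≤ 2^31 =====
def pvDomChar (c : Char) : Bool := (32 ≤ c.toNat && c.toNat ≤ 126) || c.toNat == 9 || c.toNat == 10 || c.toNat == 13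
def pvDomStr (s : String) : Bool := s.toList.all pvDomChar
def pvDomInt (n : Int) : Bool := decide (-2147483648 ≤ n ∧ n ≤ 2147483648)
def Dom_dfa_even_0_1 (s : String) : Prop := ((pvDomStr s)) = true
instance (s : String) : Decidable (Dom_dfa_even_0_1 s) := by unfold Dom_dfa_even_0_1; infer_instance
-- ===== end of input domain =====

-- B replaces A's 4-state machine with a closed-form parity check on character counts (objective: simpler).

-- ===== PORT A =====
-- one step of A's if/elif chain over the state strings
def dfaStep (state : String) (c : Char) : String :=
  if state == "q0" then (if c == '0' then "q2" else "q1")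
  else if state == "q1" then (if c == '0' then "q3" else "q0")
  else if state == "q2" then (if c == '0' then "q0" else "q3")
  else if state == "q3" then (if c == '0' then "q1" else "q2")
  else state

def dfa_even_0_1 (s : String) : Bool :=
  (s.toList.foldl dfaStep "q0") == "q0"

-- ===== PORT B =====
def dfa_even_0_1_alt (s : String) : Bool :=
  let zeros : Int := (PySem.Str.count s "0" : Int)
  (PySem.Int.mod zeros 2 == 0) && (PySem.Int.mod (PySem.Str.len s - zeros) 2 == 0)

-- ===== PRECONDITION & SPEC =====
def Spec_dfa_even_0_1 (s : String) (out : Bool) : Prop := out = dfa_even_0_1_alt s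
instance (s : String) (out : Bool) : Decidable (Spec_dfa_even_0_1 s out) := by unfold Spec_dfa_even_0_1; infer_instance

-- ===== CLAIM (what is proved, stated in full; the proofs are below) =====
def Claim_equal_dfa_even_0_1 : Prop := ∀ (s : String), Dom_dfa_even_0_1 s → Spec_dfa_even_0_1 s (dfa_even_0_1 s)

-- ===== LEMMAS AND PROOFS =====

-- PySem.Chars.count with a single-character pattern is List.count
theorem pv_go_single (cs : List Char) : ∀ (fuel acc : Nat), cs.length ≤ fuel →
    PySem.Chars.count.go ['0'] fuel cs acc = acc + cs.count '0' := by
  induction cs with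
  | nil => intro fuel acc _; cases fuel <;> simp [PySem.Chars.count.go]
  | cons c t ih =>
      intro fuel acc h
      cases fuel with
      | zero => simp at h
      | succ f =>
          rw [PySem.Chars.count.go]
          by_cases hc : c = '0'
          · subst hc
            simp [List.isPrefixOf, ih f (acc + 1) (by simpa using h)]
            omega
          · simp [List.isPrefixOf, hc, Ne.symm hc, ih f acc (by simpa using h)]

theorem pv_count_single (cs : List Char) : PySem.Chars.count cs ['0'] = cs.count '0' := by
  simp [PySem.Chars.count]
  simpa using pv_go_single cs cs.length 0 le_rfl

-- the state encoding: enc z o = the state with zero-parity z and other-parity o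
def pvEnc (z o : Bool) : String :=
  match z, o with
  | false, false => "q0"
  | false, true  => "q1"
  | true,  false => "q2"
  | true,  true  => "q3"

theorem pv_step_enc (z o : Bool) (c : Char) :
    dfaStep (pvEnc z o) c = pvEnc (z ^^ (c == '0')) (o ^^ !(c == '0')) := by
  by_cases hc : c = '0'
  · cases z <;> cases o <;> simp [pvEnc, dfaStep, hc]
  · have h0 : (c == '0') = false := by simp [hc]
    cases z <;> cases o <;> simp [pvEnc, dfaStep, h0]

def pvPz (l : List Char) : Bool := l.count '0' % 2 == 1
def pvPo (l : List Char) : Bool := (l.countP (fun c => !(c == '0'))) % 2 == 1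

theorem pv_fold_enc (l : List Char) : ∀ (z o : Bool),
    l.foldl dfaStep (pvEnc z o) = pvEnc (z ^^ pvPz l) (o ^^ pvPo l) := by
  induction l with
  | nil => intro z o; simp [pvPz, pvPo]
  | cons c t ih =>
      intro z o
      have hz : pvPz (c :: t) = ((c == '0') ^^ pvPz t) := by
        by_cases hc : c = '0' <;>
          simp [pvPz, List.count_cons, hc, Nat.add_mod] <;>
          rcases Nat.mod_two_eq_zero_or_one (t.count '0') with h | h <;> simp [h, hc]
      have ho : pvPo (c :: t) = ((!(c == '0')) ^^ pvPo t) := by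
        by_cases hc : c = '0' <;>
          simp [pvPo, List.countP_cons, hc, Nat.add_mod] <;>
          rcases Nat.mod_two_eq_zero_or_one (t.countP (fun c => !(c == '0'))) with h | h <;> simp [h, hc]
      simp only [List.foldl_cons, pv_step_enc, ih, hz, ho, Bool.xor_assoc]

-- ===== VERDICT (by name: the statement is the Claim_ definition above) =====
-- PySem.Int.mod on a Nat cast with modulus 2 is the Nat mod, cast back
theorem pv_mod_cast (n : Nat) : PySem.Int.mod (↑n) 2 = ↑(n % 2) := by
  simp [PySem.Int.mod, Int.fmod_eq_emod]

theorem dfa_even_0_1_spec : Claim_equal_dfa_even_0_1 := by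
  intro s _
  unfold Spec_dfa_even_0_1 dfa_even_0_1 dfa_even_0_1_alt
  have hq : ("q0" : String) = pvEnc false false := rfl
  have hfold := pv_fold_enc s.toList false false
  simp only [Bool.false_xor] at hfold
  have hcnt : PySem.Str.count s "0" = s.toList.count '0' := by
    simpa [PySem.Str.count] using pv_count_single s.toList
  have hlen : PySem.Str.len s = (s.toList.length : Int) := by
    simp [PySem.Str.len_eq]
  have hls : s.toList.length = s.length := by simp
  have hle : s.toList.count '0' ≤ s.toList.length := List.count_le_length
  have hsub : ((s.toList.length : Int) - (s.toList.count '0' : Int)) =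
      ((s.toList.length - s.toList.count '0' : Nat) : Int) := by omega
  have hsplit : s.toList.countP (fun c => !(c == '0')) + s.toList.count '0' = s.toList.length := by
    simpa [List.count, Bool.not_not] using
      (List.length_eq_countP_add_countP (l := s.toList) (fun c => !(c == '0'))).symm
  simp only [hq, hfold, hcnt, hlen, hsub, pv_mod_cast]
  rcases hz : pvPz s.toList with _ | _ <;> rcases ho : pvPo s.toList with _ | _ <;>
    simp only [pvPz, pvPo, beq_iff_eq, beq_eq_false_iff_ne, ne_eq] at hz ho <;>
    simp [pvEnc] <;> omega
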